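-- pv_equiv track=rewrite | github.com/hso8706/TIL-SAF | example_algorithm/daily_code/daily_03/03_list_to_dict_blood_type.py | blood_type_dict
-- ===== SOURCE A (Python) =====
-- def blood_type_dict(list_blood):
--     dict_blood = {}
--     for blood_type in sorted(list_blood): # 보기좋게 추가로 sorted()함수 사용. 정렬된 리스트를 반환하는 함수
--         if blood_type in dict_blood.keys():
--             dict_blood[blood_type] += 1
--         else:
--             dict_blood[blood_type] = 1
--     return dict_blood
-- ===== SOURCE B (Python) =====
-- def blood_type_dict(list_blood):
--     # Run-length scan of the sorted list: track the current run and write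
--     # each key exactly once when its run ends -- no membership tests, no
--     # incremental updates of existing dict entries.
--     result = {}
--     current = None
--     count = 0
--     for b in sorted(list_blood):
--         if count and b == current:
--             count += 1
--         else:
--             if count:
--                 result[current] = count
--             current = b
--             count = 1
--     if count:
--         result[current] = count
--     return result
-- ===== Notes on version B (the rewrite author's own statement) =====
-- stated objective: alternative
-- what changed: B replaces A's per-element dict-membership-and-increment loop with a run-length scan of the sorted list: it tracks the current run (value, length) and writes each key into the dict exactly once when its run ends.
import Mathlib
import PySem

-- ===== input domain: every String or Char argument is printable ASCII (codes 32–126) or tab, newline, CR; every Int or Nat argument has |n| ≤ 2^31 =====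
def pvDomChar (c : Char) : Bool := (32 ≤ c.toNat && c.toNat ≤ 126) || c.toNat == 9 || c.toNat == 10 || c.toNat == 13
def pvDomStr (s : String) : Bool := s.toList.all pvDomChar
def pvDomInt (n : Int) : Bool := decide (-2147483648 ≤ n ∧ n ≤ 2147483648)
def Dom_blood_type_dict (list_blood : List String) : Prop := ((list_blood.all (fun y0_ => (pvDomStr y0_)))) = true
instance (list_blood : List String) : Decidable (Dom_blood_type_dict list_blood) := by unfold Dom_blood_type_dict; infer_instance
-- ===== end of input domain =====

-- B replaces A's dict-membership counting with a run-length scan of the sorted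
-- list (each key written once when its run ends); proved to return the same dict.


-- ===== PORT A =====
def blood_type_dict (list_blood : List String) : List (String × Int) :=
  ((PySem.List.sorted list_blood (fun x => x)).foldl
    (fun d b =>
      if d.contains b then d.insert b (d.getD b 0 + 1)
      else d.insert b 1)
    PySem.Dict.empty).items

-- ===== PORT B =====
-- 'if count: result[current] = count' (the flush, written twice in Source B)
def bFlush (result : PySem.Dict String Int) (current : Option String) (count : Int) :
    PySem.Dict String Int :=
  if count ≠ 0 then
    match current with
    | some c => result.insert c count
    | none => result
  else result

-- the body of Source B's for-loop over the sorted list; state = (result, current, count)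
def bStep (st : PySem.Dict String Int × Option String × Int) (b : String) :
    PySem.Dict String Int × Option String × Int :=
  if st.2.2 ≠ 0 ∧ st.2.1 = some b then (st.1, st.2.1, st.2.2 + 1)
  else (bFlush st.1 st.2.1 st.2.2, some b, 1)

def blood_type_dict_alt (list_blood : List String) : List (String × Int) :=
  let st := (PySem.List.sorted list_blood (fun x => x)).foldl bStep
    (PySem.Dict.empty, none, 0)
  (bFlush st.1 st.2.1 st.2.2).items

-- ===== PRECONDITION & SPEC =====
def Spec_blood_type_dict (list_blood : List String) (out : List (String × Int)) : Prop := out = blood_type_dict_alt list_blood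
instance (list_blood : List String) (out : List (String × Int)) : Decidable (Spec_blood_type_dict list_blood out) := by unfold Spec_blood_type_dict; infer_instance

-- ===== CLAIM =====
def Claim_equal_blood_type_dict : Prop := ∀ (list_blood : List String), Dom_blood_type_dict list_blood → Spec_blood_type_dict list_blood (blood_type_dict list_blood)

-- ===== LEMMAS AND PROOFS =====

-- coupling invariant: running B's deferred-run loop from state (dB, some c, k)
-- and flushing equals running A's membership-counting loop from dB.insert c k,
-- provided the suffix s is sorted, every element of s is ≥ c, c is not yet a
-- key of dB, and every key of dB is ≤ c.
theorem pv_coupling (s : List String) (dB : PySem.Dict String Int) (c : String) (k : Int)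
    (hs : s.Pairwise (· ≤ ·)) (hk : 0 < k)
    (hc : dB.get? c = none)
    (hge : ∀ x ∈ s, c ≤ x)
    (hkeys : ∀ x ∈ dB.keys, x ≤ c) :
    (fun st : PySem.Dict String Int × Option String × Int =>
        bFlush st.1 st.2.1 st.2.2) (s.foldl bStep (dB, some c, k))
      = s.foldl
          (fun d b =>
            if d.contains b then d.insert b (d.getD b 0 + 1)
            else d.insert b 1)
          (dB.insert c k) := by
  induction s generalizing dB c k with
  | nil =>
      simp [bFlush, hk.ne']
  | cons b s ih =>
      have hbs : ∀ x ∈ s, b ≤ x := by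
        intro x hx; exact (List.pairwise_cons.mp hs).1 x hx
      have hs' : s.Pairwise (· ≤ ·) := (List.pairwise_cons.mp hs).2
      have hcb : c ≤ b := hge b (List.mem_cons_self ..)
      by_cases hbc : c = b
      · subst hbc
        have hstepB : bStep (dB, some c, k) c = (dB, some c, k + 1) := by
          simp [bStep, hk.ne']
        have hcont : (dB.insert c k).contains c = true :=
          PySem.Dict.contains_insert_self dB c k
        have hstepA :
            (if (dB.insert c k).contains c then
              (dB.insert c k).insert c ((dB.insert c k).getD c 0 + 1)
            else (dB.insert c k).insert c 1) = dB.insert c (k + 1) := by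
          rw [if_pos hcont, PySem.Dict.getD_insert_self, PySem.Dict.insert_insert_self]
        simp only [List.foldl_cons, hstepB, hstepA]
        exact ih dB c (k + 1) hs' (by omega) hc
          (fun x hx => hge x (List.mem_cons_of_mem _ hx)) hkeys
      · have hlt : c < b := lt_of_le_of_ne hcb hbc
        have hstepB : bStep (dB, some c, k) b = (dB.insert c k, some b, 1) := by
          simp [bStep, bFlush, hk.ne', fun h : (c : String) = b => hbc h]
        have hbnot : b ∉ (dB.insert c k).keys := by
          rw [PySem.Dict.mem_keys_insert]
          rintro (rfl | hb)
          · exact hbc rfl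
          · exact absurd (hkeys b hb) (not_le.mpr hlt)
        have hcont : (dB.insert c k).contains b = false := by
          have := PySem.Dict.contains_iff_mem_keys (d := dB.insert c k) (k := b)
          simp only [← this] at hbnot
          simpa using hbnot
        have hstepA :
            (if (dB.insert c k).contains b then
              (dB.insert c k).insert b ((dB.insert c k).getD b 0 + 1)
            else (dB.insert c k).insert b 1) = (dB.insert c k).insert b 1 := by
          rw [if_neg (by simp [hcont])]
        simp only [List.foldl_cons, hstepB, hstepA]
        exact ih (dB.insert c k) b 1 hs' one_pos
          ((PySem.Dict.get?_eq_none_iff_not_mem_keys _ _).mpr hbnot)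
          hbs
          (fun x hx => by
            rcases (PySem.Dict.mem_keys_insert _ _ _ _).mp hx with rfl | hx'
            · exact le_of_lt hlt
            · exact le_trans (hkeys x hx') (le_of_lt hlt))

theorem blood_type_dict_eq (l : List String) :
    blood_type_dict l = blood_type_dict_alt l := by
  unfold blood_type_dict blood_type_dict_alt
  cases hsort : PySem.List.sorted l (fun x => x) with
  | nil => simp [bFlush]
  | cons b s =>
      have hpw : (b :: s).Pairwise (· ≤ ·) := by
        rw [← hsort]; exact PySem.List.sorted_pairwise l (fun x => x)
      have hstepB : bStep (PySem.Dict.empty, none, 0) b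
          = (PySem.Dict.empty, some b, 1) := by
        simp [bStep, bFlush]
      have hstepA :
          (if (PySem.Dict.empty : PySem.Dict String Int).contains b then
            (PySem.Dict.empty : PySem.Dict String Int).insert b
              ((PySem.Dict.empty : PySem.Dict String Int).getD b 0 + 1)
          else (PySem.Dict.empty : PySem.Dict String Int).insert b 1)
            = (PySem.Dict.empty : PySem.Dict String Int).insert b 1 := by
        simp [PySem.Dict.contains_empty]
      simp only [List.foldl_cons, hstepB, hstepA]
      rw [← pv_coupling s PySem.Dict.empty b 1 (List.pairwise_cons.mp hpw).2 one_pos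
        (PySem.Dict.get?_empty b)
        (List.pairwise_cons.mp hpw).1
        (by simp [PySem.Dict.keys_empty])]

-- ===== VERDICT =====
theorem blood_type_dict_spec : Claim_equal_blood_type_dict := by
  intro l _
  exact blood_type_dict_eq l
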